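-- pv_equiv track=rewrite | github.com/yuguonet/QuantDinger | backend_api_python/app/utils/language.py | _normalize_lang
-- ===== SOURCE A (Python) =====
-- from typing import Optional
--
-- SUPPORTED_LANGS = {
--     "en-US",
--     "zh-CN",
--     "zh-TW",
--     "ja-JP",
--     "ko-KR",
--     "vi-VN",
--     "th-TH",
--     "ar-SA",
--     "fr-FR",
--     "de-DE",
-- }
--
-- def _normalize_lang(raw: Optional[str]) -> Optional[str]:
--     if not raw:
--         return None
--     s = str(raw).strip()
--     if not s:
--         return None
--
--     # Accept-Language can be like: "en-US,en;q=0.9"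
--     if "," in s:
--         s = s.split(",", 1)[0].strip()
--     if ";" in s:
--         s = s.split(";", 1)[0].strip()
--
--     # Normalize short tags
--     lower = s.lower()
--     if lower in ("en", "en-us"):
--         return "en-US"
--     if lower in ("zh", "zh-cn", "zh-hans"):
--         return "zh-CN"
--     if lower in ("zh-tw", "zh-hant"):
--         return "zh-TW"
--
--     # Keep canonical casing if already supported
--     for lang in SUPPORTED_LANGS:
--         if lang.lower() == lower:
--             return lang
--     return None
-- ===== SOURCE B (Python) =====
-- from typing import Optional
--
-- SUPPORTED_LANGS = {
--     "en-US",
--     "zh-CN",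
--     "zh-TW",
--     "ja-JP",
--     "ko-KR",
--     "vi-VN",
--     "th-TH",
--     "ar-SA",
--     "fr-FR",
--     "de-DE",
-- }
--
-- # One flat table: lowercase key -> canonical tag (aliases + each supported tag).
-- NORMALIZE = {
--     "en": "en-US",
--     "en-us": "en-US",
--     "zh": "zh-CN",
--     "zh-cn": "zh-CN",
--     "zh-hans": "zh-CN",
--     "zh-tw": "zh-TW",
--     "zh-hant": "zh-TW",
--     "ja-jp": "ja-JP",
--     "ko-kr": "ko-KR",
--     "vi-vn": "vi-VN",
--     "th-th": "th-TH",
--     "ar-sa": "ar-SA",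
--     "fr-fr": "fr-FR",
--     "de-de": "de-DE",
-- }
--
-- def _normalize_lang(raw: Optional[str]) -> Optional[str]:
--     if not raw:
--         return None
--     # Single left-to-right character scan over the stripped header: cut at the
--     # first ',' or ';' and lowercase on the fly (no staged split/strip passes).
--     buf = []
--     for ch in raw.strip():
--         if ch == ',' or ch == ';':
--             break
--         buf.append(ch.lower())
--     return NORMALIZE.get("".join(buf).strip())
-- ===== Notes on version B (the rewrite author's own statement) =====
-- stated objective: alternative
-- what changed: A's staged pipeline (strip, split-on-comma+strip, split-on-semicolon+strip, lower, alias if-chain, then a linear scan over SUPPORTED_LANGS) is replaced by one left-to-right character scan that cuts at the first comma or semicolon while lowercasing on the fly, followed by a single flat-table lookup (lowercase key -> canonical tag).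
import Mathlib
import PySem

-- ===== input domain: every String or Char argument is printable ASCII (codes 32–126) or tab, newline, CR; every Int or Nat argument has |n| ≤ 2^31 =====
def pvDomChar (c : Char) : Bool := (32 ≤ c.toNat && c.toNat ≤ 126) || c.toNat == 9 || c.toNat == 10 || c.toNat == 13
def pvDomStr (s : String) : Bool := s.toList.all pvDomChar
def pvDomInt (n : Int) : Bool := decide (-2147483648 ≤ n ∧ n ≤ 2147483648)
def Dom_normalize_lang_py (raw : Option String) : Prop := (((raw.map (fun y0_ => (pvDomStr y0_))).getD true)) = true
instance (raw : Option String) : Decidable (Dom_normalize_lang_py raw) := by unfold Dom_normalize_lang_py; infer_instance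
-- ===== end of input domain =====

-- B replaces A's staged pipeline (strip, two split+strip stages, lower, alias if-chain,
-- scan over SUPPORTED_LANGS) by one character scan that cuts at the first comma or semicolon
-- while lowercasing on the fly, then a single flat-table lookup (alternative).


-- ===== PORT A =====
-- SUPPORTED_LANGS as a PySem.Set (distinct elements, insertion order)
def pvSupportedLangs : PySem.Set String :=
  PySem.Set.ofList ["en-US", "zh-CN", "zh-TW", "ja-JP", "ko-KR", "vi-VN", "th-TH", "ar-SA", "fr-FR", "de-DE"]

-- 'for lang in SUPPORTED_LANGS: if lang.lower() == lower: return lang' then 'return None'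
def pvScanSupported (lower : String) : List String → Option String
  | [] => none
  | lang :: rest => if PySem.Str.lower lang = lower then some lang else pvScanSupported lower rest

def normalize_lang_py (raw : Option String) : Option String :=
  match raw with
  | none => none
  | some r =>
    if r = "" then none
    else
      let s0 := PySem.Str.strip r
      if s0 = "" then none
      else
        let s1 := if PySem.Str.isIn "," s0 then
                    PySem.Str.strip (((PySem.Str.splitMax? s0 "," 1).getD []).headD "")
                  else s0
        let s2 := if PySem.Str.isIn ";" s1 then
                    PySem.Str.strip (((PySem.Str.splitMax? s1 ";" 1).getD []).headD "")
                  else s1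
        let lower := PySem.Str.lower s2
        if lower = "en" ∨ lower = "en-us" then some "en-US"
        else if lower = "zh" ∨ lower = "zh-cn" ∨ lower = "zh-hans" then some "zh-CN"
        else if lower = "zh-tw" ∨ lower = "zh-hant" then some "zh-TW"
        else pvScanSupported lower pvSupportedLangs

-- ===== PORT B =====
-- the module-level NORMALIZE dict of Source B
def pvNormalizeTable : PySem.Dict String String :=
  PySem.Dict.ofList
    [("en", "en-US"), ("en-us", "en-US"),
     ("zh", "zh-CN"), ("zh-cn", "zh-CN"), ("zh-hans", "zh-CN"),
     ("zh-tw", "zh-TW"), ("zh-hant", "zh-TW"),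
     ("ja-jp", "ja-JP"), ("ko-kr", "ko-KR"), ("vi-vn", "vi-VN"),
     ("th-th", "th-TH"), ("ar-sa", "ar-SA"), ("fr-fr", "fr-FR"), ("de-de", "de-DE")]

-- Source B's loop 'for ch in raw.strip(): if ch == "," or ch == ";": break; buf.append(ch.lower())'
def pvScanTok : List Char → List Char
  | [] => []
  | c :: rest => if c = ',' ∨ c = ';' then [] else PySem.Chars.lowerChar c :: pvScanTok rest

def normalize_lang_py_alt (raw : Option String) : Option String :=
  match raw with
  | none => none
  | some r =>
    if r = "" then none
    else
      let buf := pvScanTok (PySem.Str.strip r).toList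
      pvNormalizeTable.get? (PySem.Str.strip (String.ofList buf))

-- ===== PRECONDITION & SPEC =====
def Spec_normalize_lang_py (raw : Option String) (out : Option String) : Prop := out = normalize_lang_py_alt raw
instance (raw : Option String) (out : Option String) : Decidable (Spec_normalize_lang_py raw out) := by unfold Spec_normalize_lang_py; infer_instance

-- ===== CLAIM (what is proved, stated in full; the proofs are below) =====
def Claim_equal_normalize_lang_py : Prop := ∀ (raw : Option String), Dom_normalize_lang_py raw → Spec_normalize_lang_py raw (normalize_lang_py raw)

-- ===== LEMMAS AND PROOFS =====

lemma pv_sp_lowerChar (c : Char) :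
    PySem.Chars.isspace (PySem.Chars.lowerChar c) = PySem.Chars.isspace c := by
  unfold PySem.Chars.lowerChar
  split_ifs with h
  · have h' : 65 ≤ c.toNat ∧ c.toNat ≤ 90 := by
      simp only [PySem.Chars.isupper, Bool.and_eq_true, decide_eq_true_eq] at h
      exact ⟨h.1, h.2⟩
    have hvalid : Nat.isValidChar (c.toNat + 32) := Or.inl (by omega)
    have hv : (Char.ofNat (c.toNat + 32)).toNat = c.toNat + 32 := by
      rw [Char.toNat_ofNat, if_pos hvalid]
    have key : ∀ (a : Char), 65 ≤ a.toNat → a.toNat ≤ 122 → PySem.Chars.isspace a = false := by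
      intro a ha1 ha2
      simp only [PySem.Chars.isspace]
      simp only [Bool.or_eq_false_iff, Bool.and_eq_false_iff, decide_eq_false_iff_not]
      omega
    rw [key c (by omega) (by omega), key (Char.ofNat (c.toNat + 32)) (by rw [hv]; omega) (by rw [hv]; omega)]
  · rfl

lemma pv_dropWhile_append_all {p : Char → Bool} (w z : List Char) (hw : ∀ c ∈ w, p c = true) :
    List.dropWhile p (w ++ z) = List.dropWhile p z := by
  rw [List.dropWhile_append]
  have h : List.dropWhile p w = [] := List.dropWhile_eq_nil_iff.mpr hw
  simp [h]

lemma pv_takeWhile_append_all {p : Char → Bool} (w z : List Char) (hw : ∀ c ∈ w, p c = true) :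
    List.takeWhile p (w ++ z) = w ++ List.takeWhile p z := by
  rw [List.takeWhile_append]
  have h : List.takeWhile p w = w := List.takeWhile_eq_self_iff.mpr hw
  simp [h]

lemma pv_rstrip_idem (y : List Char) :
    PySem.Chars.rstrip (PySem.Chars.rstrip y) = PySem.Chars.rstrip y := by
  simp [PySem.Chars.rstrip, List.dropWhile_idempotent]

lemma pv_go_m0 (d : Char) (fuel : Nat) (l cur : List Char) (p : List Char) :
    PySem.Chars.splitOnMax.go [d] fuel 0 l cur [p] = [p, cur.reverse ++ l] := by
  cases fuel with
  | zero => simp [PySem.Chars.splitOnMax.go]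
  | succ n => cases l <;> simp [PySem.Chars.splitOnMax.go]


lemma pv_scanTok_eq (cs : List Char) :
    pvScanTok cs = PySem.Chars.lower (cs.takeWhile (fun c => !(c == ',' || c == ';'))) := by
  induction cs with
  | nil => simp [pvScanTok, PySem.Chars.lower]
  | cons c rest ih =>
    by_cases h : c = ',' ∨ c = ';'
    · simp [pvScanTok, h, List.takeWhile_cons, PySem.Chars.lower]
      rcases h with h | h <;> simp [h, PySem.Chars.lower]
    · rw [not_or] at h
      simp [pvScanTok, h.1, h.2, List.takeWhile_cons, PySem.Chars.lower, ih]

lemma pv_go_head (d : Char) (fuel : Nat) (l cur : List Char) (h : l.length < fuel) :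
    (PySem.Chars.splitOnMax.go [d] fuel 1 l cur []).head? =
      some (cur.reverse ++ l.takeWhile (fun c => c != d)) := by
  induction fuel generalizing l cur with
  | zero => omega
  | succ n ih =>
    cases l with
    | nil => simp [PySem.Chars.splitOnMax.go]
    | cons c rest =>
      by_cases hc : c = d
      · subst hc
        simp only [PySem.Chars.splitOnMax.go]
        rw [if_neg (by omega)]
        have hpre : List.isPrefixOf [c] (c :: rest) = true := by simp [List.isPrefixOf]
        rw [if_pos hpre]
        simp [pv_go_m0]
      · simp only [PySem.Chars.splitOnMax.go]
        rw [if_neg (by omega)]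
        have hpre : List.isPrefixOf [d] (c :: rest) = false := by
          simp [List.isPrefixOf, Ne.symm hc]
        rw [if_neg (by simp [hpre])]
        rw [ih rest (c :: cur) (by simpa using Nat.lt_of_succ_lt_succ h)]
        simp [hc]


lemma pv_rstrip_decomp (y : List Char) :
    PySem.Chars.rstrip y ++ (y.reverse.takeWhile PySem.Chars.isspace).reverse = y := by
  have h := congrArg List.reverse
    (List.takeWhile_append_dropWhile (p := PySem.Chars.isspace) (l := y.reverse))
  simp only [List.reverse_append, List.reverse_reverse] at h
  simpa [PySem.Chars.rstrip] using h

lemma pv_lstrip_rstrip_comm (y : List Char) :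
    PySem.Chars.lstrip (PySem.Chars.rstrip y) = PySem.Chars.rstrip (PySem.Chars.lstrip y) := by
  by_cases hall : ∀ c ∈ y, PySem.Chars.isspace c = true
  · have h1 : PySem.Chars.lstrip y = [] := List.dropWhile_eq_nil_iff.mpr hall
    have h2 : PySem.Chars.rstrip y = [] := by
      simp only [PySem.Chars.rstrip]
      have : List.dropWhile PySem.Chars.isspace y.reverse = [] :=
        List.dropWhile_eq_nil_iff.mpr (by intro c hc; exact hall c (List.mem_reverse.mp hc))
      simp [this]
    rw [h2, h1]
    rfl
  · set w := y.takeWhile PySem.Chars.isspace with hw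
    set t := y.dropWhile PySem.Chars.isspace with ht
    have hyd : w ++ t = y := List.takeWhile_append_dropWhile
    have hwall : ∀ c ∈ w, PySem.Chars.isspace c = true := fun c hc => List.mem_takeWhile_imp hc
    have htne : t ≠ [] := by
      intro h
      apply hall
      intro c hc
      rw [← hyd] at hc
      rcases List.mem_append.mp hc with h1 | h1
      · exact hwall c h1
      · rw [h] at h1; simp at h1
    obtain ⟨c0, t', htc⟩ := List.exists_cons_of_ne_nil htne
    have hthead : PySem.Chars.isspace (t.head htne) = false := by
      have := List.head_dropWhile_not PySem.Chars.isspace (l := y) (by rw [← ht]; exact htne)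
      simpa [← ht] using this
    have hc0 : PySem.Chars.isspace c0 = false := by
      have hh : t.head htne = c0 := by
        have h1 := List.head?_eq_some_head (l := t) htne
        have h2 : t.head? = some c0 := by rw [htc]; rfl
        exact Option.some_injective _ (h1.symm.trans h2)
      rw [hh] at hthead; exact hthead
    have hc0t : c0 ∈ t := by rw [htc]; exact List.mem_cons_self
    have hdne : List.dropWhile PySem.Chars.isspace t.reverse ≠ [] := by
      intro h
      have := List.dropWhile_eq_nil_iff.mp h c0 (List.mem_reverse.mpr hc0t)
      rw [hc0] at this; simp at this
    have hry : PySem.Chars.rstrip y = w ++ PySem.Chars.rstrip t := by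
      simp only [PySem.Chars.rstrip]
      rw [← hyd, List.reverse_append, List.dropWhile_append]
      rw [if_neg (by simpa using hdne)]
      simp
    have hrtne : PySem.Chars.rstrip t ≠ [] := by
      simp only [PySem.Chars.rstrip]
      simpa using hdne
    obtain ⟨a, u, hau⟩ := List.exists_cons_of_ne_nil hrtne
    have hac0 : a = c0 := by
      have hdec := pv_rstrip_decomp t
      rw [hau, htc] at hdec
      simpa using congrArg (List.head? ·) hdec
    have hlr : PySem.Chars.lstrip (PySem.Chars.rstrip t) = PySem.Chars.rstrip t := by
      rw [hau, hac0]
      simp [PySem.Chars.lstrip, hc0]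
    have hlt : PySem.Chars.lstrip y = t := by simp [PySem.Chars.lstrip, ← ht]
    rw [hry, hlt]
    show List.dropWhile PySem.Chars.isspace (w ++ PySem.Chars.rstrip t) = _
    rw [pv_dropWhile_append_all _ _ hwall]
    exact hlr


lemma pv_strip_rstrip (y : List Char) :
    PySem.Chars.strip (PySem.Chars.rstrip y) = PySem.Chars.strip y := by
  simp only [PySem.Chars.strip]
  rw [pv_lstrip_rstrip_comm, pv_rstrip_idem]

lemma pv_strip_idem (y : List Char) :
    PySem.Chars.strip (PySem.Chars.strip y) = PySem.Chars.strip y := by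
  simp only [PySem.Chars.strip]
  rw [pv_lstrip_rstrip_comm, pv_rstrip_idem]
  have : PySem.Chars.lstrip (PySem.Chars.lstrip y) = PySem.Chars.lstrip y := by
    simp [PySem.Chars.lstrip, List.dropWhile_idempotent]
  rw [this]

lemma pv_strip_sp_append (w z : List Char) (hw : ∀ c ∈ w, PySem.Chars.isspace c = true) :
    PySem.Chars.strip (w ++ z) = PySem.Chars.strip z := by
  simp only [PySem.Chars.strip, PySem.Chars.lstrip]
  rw [pv_dropWhile_append_all w z hw]

lemma pv_seg_rstrip (d : Char) (hd : PySem.Chars.isspace d = false) (y : List Char) :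
    PySem.Chars.strip (List.takeWhile (fun c => c != d) (PySem.Chars.rstrip y)) =
      PySem.Chars.strip (List.takeWhile (fun c => c != d) y) := by
  have hdecomp := pv_rstrip_decomp y
  have hv : ∀ c ∈ (y.reverse.takeWhile PySem.Chars.isspace).reverse, (c != d) = true := by
    intro c hc
    have hsp : PySem.Chars.isspace c = true := List.mem_takeWhile_imp (List.mem_reverse.mp hc)
    simp only [bne_iff_ne, ne_eq]
    intro h
    rw [h, hd] at hsp
    simp at hsp
  conv_rhs => rw [← hdecomp]
  rw [List.takeWhile_append]
  by_cases hlen : ((PySem.Chars.rstrip y).takeWhile (fun c => c != d)).length = (PySem.Chars.rstrip y).length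
  · have huq : (PySem.Chars.rstrip y).takeWhile (fun c => c != d) = PySem.Chars.rstrip y :=
      (List.takeWhile_prefix _).eq_of_length hlen
    rw [if_pos hlen, huq]
    have hvq : List.takeWhile (fun c => c != d) (y.reverse.takeWhile PySem.Chars.isspace).reverse
        = (y.reverse.takeWhile PySem.Chars.isspace).reverse := List.takeWhile_eq_self_iff.mpr hv
    rw [hvq, hdecomp, pv_strip_rstrip]
  · rw [if_neg hlen]

lemma pv_seg_strip (d : Char) (hd : PySem.Chars.isspace d = false) (x : List Char) :
    PySem.Chars.strip (List.takeWhile (fun c => c != d) (PySem.Chars.strip x)) =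
      PySem.Chars.strip (List.takeWhile (fun c => c != d) x) := by
  have h1 : PySem.Chars.strip x = PySem.Chars.rstrip (PySem.Chars.lstrip x) := rfl
  rw [h1, pv_seg_rstrip d hd]
  -- now: strip (takeWhile q (lstrip x)) = strip (takeWhile q x)
  have hw : ∀ c ∈ x.takeWhile PySem.Chars.isspace, (c != d) = true := by
    intro c hc
    have hsp := List.mem_takeWhile_imp hc
    simp only [bne_iff_ne, ne_eq]
    intro h
    rw [h, hd] at hsp
    simp at hsp
  have hx : x.takeWhile PySem.Chars.isspace ++ x.dropWhile PySem.Chars.isspace = x :=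
    List.takeWhile_append_dropWhile
  conv_rhs => rw [← hx]
  rw [pv_takeWhile_append_all _ _ hw,
    pv_strip_sp_append _ _ (fun c hc => List.mem_takeWhile_imp hc)]
  rfl

lemma pv_strip_lower (x : List Char) :
    PySem.Chars.strip (PySem.Chars.lower x) = PySem.Chars.lower (PySem.Chars.strip x) := by
  simp only [PySem.Chars.strip, PySem.Chars.lower, PySem.Chars.lstrip, PySem.Chars.rstrip,
    List.dropWhile_map, ← List.map_reverse, Function.comp_def, pv_sp_lowerChar]

lemma pv_stage (d : Char) (sep : String) (hsep : sep.toList = [d]) (s : String)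
    (hs : PySem.Chars.strip s.toList = s.toList) :
    (if PySem.Str.isIn sep s then
        PySem.Str.strip (((PySem.Str.splitMax? s sep 1).getD []).headD "")
      else s) =
      String.ofList (PySem.Chars.strip (s.toList.takeWhile (fun c => c != d))) := by
  by_cases hin : PySem.Str.isIn sep s
  · rw [if_pos hin]
    have hsplit : PySem.Str.splitMax? s sep 1 =
        some (List.map String.ofList (PySem.Chars.splitOnMax s.toList [d] 1)) := by
      simp [PySem.Str.splitMax?, PySem.Chars.splitMax?, hsep]
    rw [hsplit]
    have hgo : (PySem.Chars.splitOnMax s.toList [d] 1).head? =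
        some (s.toList.takeWhile (fun c => c != d)) := by
      have := pv_go_head d (s.toList.length + 1) s.toList [] (by omega)
      simpa [PySem.Chars.splitOnMax] using this
    have hhead : (List.map String.ofList (PySem.Chars.splitOnMax s.toList [d] 1)).headD "" =
        String.ofList (s.toList.takeWhile (fun c => c != d)) := by
      rw [List.headD_eq_head?_getD, List.head?_map, hgo]
      rfl
    rw [Option.getD_some, hhead]
    simp [PySem.Str.strip]
  · rw [if_neg hin]
    have hmem : d ∉ s.toList := by
      intro hmem
      apply hin
      rw [PySem.Str.isIn_iff_infix, hsep]
      obtain ⟨l1, l2, heq⟩ := List.append_of_mem hmem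
      exact ⟨l1, l2, by rw [heq]; simp⟩
    have htw : s.toList.takeWhile (fun c => c != d) = s.toList :=
      List.takeWhile_eq_self_iff.mpr (by
        intro c hc
        simp only [bne_iff_ne, ne_eq]
        intro h; rw [h] at hc; exact hmem hc)
    rw [htw, hs]
    exact String.ofList_toList.symm


-- core: A's alias if-chain followed by the scan equals B's one table lookup, for ANY lower string
lemma chain_eq_table (lower : String) :
    (if lower = "en" ∨ lower = "en-us" then some "en-US"
     else if lower = "zh" ∨ lower = "zh-cn" ∨ lower = "zh-hans" then some "zh-CN"
     else if lower = "zh-tw" ∨ lower = "zh-hant" then some "zh-TW"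
     else pvScanSupported lower pvSupportedLangs)
    = pvNormalizeTable.get? lower := by
  by_cases h1 : lower = "en"
  · subst h1; decide
  by_cases h2 : lower = "en-us"
  · subst h2; decide
  by_cases h3 : lower = "zh"
  · subst h3; decide
  by_cases h4 : lower = "zh-cn"
  · subst h4; decide
  by_cases h5 : lower = "zh-hans"
  · subst h5; decide
  by_cases h6 : lower = "zh-tw"
  · subst h6; decide
  by_cases h7 : lower = "zh-hant"
  · subst h7; decide
  by_cases h8 : lower = "ja-jp"
  · subst h8; decide
  by_cases h9 : lower = "ko-kr"
  · subst h9; decide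
  by_cases h10 : lower = "vi-vn"
  · subst h10; decide
  by_cases h11 : lower = "th-th"
  · subst h11; decide
  by_cases h12 : lower = "ar-sa"
  · subst h12; decide
  by_cases h13 : lower = "fr-fr"
  · subst h13; decide
  by_cases h14 : lower = "de-de"
  · subst h14; decide
  have hkeys : pvNormalizeTable.keys = ["en", "en-us", "zh", "zh-cn", "zh-hans", "zh-tw", "zh-hant", "ja-jp", "ko-kr", "vi-vn", "th-th", "ar-sa", "fr-fr", "de-de"] := by decide
  have hget : pvNormalizeTable.get? lower = none := by
    rw [PySem.Dict.get?_eq_none_iff_not_mem_keys, hkeys]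
    simp [h1, h2, h3, h4, h5, h6, h7, h8, h9, h10, h11, h12, h13, h14]
  have hsup : pvSupportedLangs = ["en-US", "zh-CN", "zh-TW", "ja-JP", "ko-KR", "vi-VN", "th-TH", "ar-SA", "fr-FR", "de-DE"] := by decide
  rw [if_neg (by tauto), if_neg (by tauto), if_neg (by tauto), hget, hsup]
  simp only [pvScanSupported,
    show PySem.Str.lower "en-US" = "en-us" from by decide,
    show PySem.Str.lower "zh-CN" = "zh-cn" from by decide,
    show PySem.Str.lower "zh-TW" = "zh-tw" from by decide,
    show PySem.Str.lower "ja-JP" = "ja-jp" from by decide,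
    show PySem.Str.lower "ko-KR" = "ko-kr" from by decide,
    show PySem.Str.lower "vi-VN" = "vi-vn" from by decide,
    show PySem.Str.lower "th-TH" = "th-th" from by decide,
    show PySem.Str.lower "ar-SA" = "ar-sa" from by decide,
    show PySem.Str.lower "fr-FR" = "fr-fr" from by decide,
    show PySem.Str.lower "de-DE" = "de-de" from by decide]
  simp [Ne.symm h2, Ne.symm h4, Ne.symm h6, Ne.symm h8, Ne.symm h9, Ne.symm h10, Ne.symm h11, Ne.symm h12, Ne.symm h13, Ne.symm h14]

-- ===== VERDICT (by name: the statement is the Claim_ definition above) =====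
theorem normalize_lang_py_spec : Claim_equal_normalize_lang_py := by
  intro raw _
  unfold Spec_normalize_lang_py
  cases raw with
  | none => rfl
  | some r =>
    simp only [normalize_lang_py, normalize_lang_py_alt]
    by_cases h0 : r = ""
    · rw [if_pos h0, if_pos h0]
    rw [if_neg h0, if_neg h0]
    by_cases h1 : PySem.Str.strip r = ""
    · rw [if_pos h1, h1]
      decide
    rw [if_neg h1]
    set s0 := PySem.Str.strip r with hs0def
    have hs0' : s0.toList = PySem.Chars.strip r.toList := by
      rw [hs0def]; simp [PySem.Str.strip]
    have hs0 : PySem.Chars.strip s0.toList = s0.toList := by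
      rw [hs0']; exact pv_strip_idem _
    rw [pv_stage ',' "," (by decide) s0 hs0]
    set s1 := String.ofList (PySem.Chars.strip (s0.toList.takeWhile (fun c => c != ','))) with hs1def
    have hs1l : s1.toList = PySem.Chars.strip (s0.toList.takeWhile (fun c => c != ',')) := by
      rw [hs1def]; simp
    have hs1 : PySem.Chars.strip s1.toList = s1.toList := by
      rw [hs1l]; exact pv_strip_idem _
    rw [pv_stage ';' ";" (by decide) s1 hs1]
    rw [chain_eq_table]
    -- keys agree: A's lower-of-staged-strips equals B's strip-of-lowered-scan
    have hkey : PySem.Chars.lower (PySem.Chars.strip (s1.toList.takeWhile (fun c => c != ';'))) =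
        PySem.Chars.strip (pvScanTok s0.toList) := by
      rw [hs1l, pv_seg_strip ';' (by decide), List.takeWhile_takeWhile, pv_scanTok_eq,
        pv_strip_lower]
      have hpred : (fun c => !(c == ',' || c == ';')) =
          (fun a => decide ((a != ';') = true ∧ (a != ',') = true)) := by
        funext c
        by_cases hc : c = ',' <;> by_cases hc' : c = ';' <;> simp [hc, hc']
      rw [hpred]
    have hkeyS : PySem.Str.lower
          (String.ofList (PySem.Chars.strip (s1.toList.takeWhile (fun c => c != ';')))) =
        PySem.Str.strip (String.ofList (pvScanTok s0.toList)) := by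
      simp only [PySem.Str.lower, PySem.Str.strip, String.toList_ofList]
      rw [hkey]
    exact congrArg (fun k => pvNormalizeTable.get? k) hkeyS
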